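-- pv_equiv track=rewrite | github.com/bruhismyname/Praktikum-ASA-D2 | Pertemuan 3/substring.py | solusi
-- ===== SOURCE A (Python) =====
-- def cek_baik(s):
--     for c in set(s.lower()):
--         if c.isalpha() and (c.lower() not in s or c.upper() not in s):
--             return False
--     return True
--
-- def solusi(s):
--     terpanjang = ""
--     for i in range(len(s)):
--         for j in range(i, len(s)):
--             substring = s[i:j+1]
--             if cek_baik(substring) and len(substring) > len(terpanjang):
--                 terpanjang = substring
--     return terpanjang
-- ===== SOURCE B (Python) =====
-- def solusi(s):
--     n = len(s)
--     best = ""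
--     for i in range(n):
--         lowers = set()
--         uppers = set()
--         for j in range(i, n):
--             c = s[j]
--             if c.isalpha():
--                 if c.islower():
--                     lowers.add(c)
--                 else:
--                     uppers.add(c.lower())
--             if lowers == uppers and j - i + 1 > len(best):
--                 best = s[i:j + 1]
--     return best
-- ===== Notes on version B (the rewrite author's own statement) =====
-- stated objective: faster
-- what changed: Instead of re-scanning every substring with cek_baik, B maintains for each start index the incremental sets of lowercase letters and (lowered) uppercase letters seen while the end index grows, so the per-substring O(n) niceness scan disappears and the candidate is nice exactly when the two sets are equal.
import Mathlib
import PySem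

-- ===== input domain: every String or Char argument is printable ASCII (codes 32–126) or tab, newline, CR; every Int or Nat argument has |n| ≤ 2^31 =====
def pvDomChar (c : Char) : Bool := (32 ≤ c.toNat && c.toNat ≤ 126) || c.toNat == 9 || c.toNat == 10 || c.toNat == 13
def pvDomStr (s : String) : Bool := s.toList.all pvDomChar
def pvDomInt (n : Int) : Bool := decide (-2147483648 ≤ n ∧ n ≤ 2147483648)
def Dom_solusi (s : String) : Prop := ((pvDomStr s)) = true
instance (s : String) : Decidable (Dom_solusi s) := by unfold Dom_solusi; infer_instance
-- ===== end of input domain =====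

-- B replaces A's per-substring cek_baik rescan by incremental lower/upper letter sets per start index (O(n^3) → O(n^2)): objective faster.

-- ===== PORT A =====
-- cek_baik: loop over set(s.lower()) with early 'return False' (order-independent: an all-test)
def cekBaik (s : List Char) : Bool :=
  (PySem.Set.ofList (PySem.Chars.lower s)).foldl
    (fun ok c =>
      if PySem.Chars.isalpha c &&
         (!PySem.Chars.isIn [PySem.Chars.lowerChar c] s ||
          !PySem.Chars.isIn [PySem.Chars.upperChar c] s) then false else ok) true

-- body of A's inner 'for j' loop
def stepA (cs : List Char) (i : Int) (terpanjang : List Char) (j : Int) : List Char :=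
  let sub := PySem.List.slice cs (some i) (some (j + 1))
  if cekBaik sub && decide (terpanjang.length < sub.length) then sub else terpanjang

def solusi (s : String) : String :=
  let cs := s.toList
  String.ofList <|
    (PySem.List.pyRange 0 cs.length 1).foldl (fun terpanjang i =>
      (PySem.List.pyRange i cs.length 1).foldl (stepA cs i) terpanjang) []

-- ===== PORT B =====
-- body of B's inner 'for j' loop: state = (lowers, uppers, best)
def stepB (cs : List Char) (i : Int)
    (st : PySem.Set Char × PySem.Set Char × List Char) (j : Int) :
    PySem.Set Char × PySem.Set Char × List Char :=
  let c := PySem.List.pyGetD cs j ' '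
  let st2 :=
    if PySem.Chars.isalpha c then
      if PySem.Chars.islower c then (PySem.Set.add st.1 c, st.2.1)
      else (st.1, PySem.Set.add st.2.1 (PySem.Chars.lowerChar c))
    else (st.1, st.2.1)
  let best :=
    if PySem.Set.equal st2.1 st2.2 && decide ((st.2.2.length : Int) < j - i + 1)
    then PySem.List.slice cs (some i) (some (j + 1)) else st.2.2
  (st2.1, st2.2, best)

def solusi_alt (s : String) : String :=
  let cs := s.toList
  let n : Int := cs.length
  String.ofList <|
    (PySem.List.pyRange 0 n 1).foldl (fun best i =>
      ((PySem.List.pyRange i n 1).foldl (stepB cs i)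
        (PySem.Set.empty, PySem.Set.empty, best)).2.2) []

-- ===== PRECONDITION & SPEC =====
def Spec_solusi (s : String) (out : String) : Prop := out = solusi_alt s
instance (s : String) (out : String) : Decidable (Spec_solusi s out) := by unfold Spec_solusi; infer_instance

-- ===== CLAIM (what is proved, stated in full; the proofs are below) =====
def Claim_equal_solusi : Prop := ∀ (s : String), Dom_solusi s → Spec_solusi s (solusi s)

-- ===== LEMMAS AND PROOFS =====

-- Char arithmetic facts about PySem's ASCII case primitives
lemma char_le_iff (a c : Char) : a ≤ c ↔ a.toNat ≤ c.toNat := by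
  rw [Char.le_def, UInt32.le_iff_toNat_le]; rfl

lemma char_eq_iff (a c : Char) : a = c ↔ a.toNat = c.toNat := by
  constructor
  · intro h; rw [h]
  · intro h; exact Char.ext (UInt32.toNat.inj h)

lemma islower_iff (c : Char) : PySem.Chars.islower c = true ↔ 97 ≤ c.toNat ∧ c.toNat ≤ 122 := by
  simp [PySem.Chars.islower, char_le_iff]

lemma isupper_iff (c : Char) : PySem.Chars.isupper c = true ↔ 65 ≤ c.toNat ∧ c.toNat ≤ 90 := by
  simp [PySem.Chars.isupper, char_le_iff]

lemma toNat_ofNat_valid (n : Nat) (h : n < 55296) : (Char.ofNat n).toNat = n := by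
  rw [Char.toNat_ofNat, if_pos]; left; omega

lemma lowerChar_of_islower (c : Char) (h : PySem.Chars.islower c = true) :
    PySem.Chars.lowerChar c = c := by
  rw [islower_iff] at h; rw [PySem.Chars.lowerChar, if_neg]; rw [isupper_iff]; omega

lemma lowerChar_of_not_upper (c : Char) (h : PySem.Chars.isupper c = false) :
    PySem.Chars.lowerChar c = c := by
  rw [PySem.Chars.lowerChar, if_neg]; simp [h]

lemma toNat_lowerChar_of_isupper (c : Char) (h : PySem.Chars.isupper c = true) :
    (PySem.Chars.lowerChar c).toNat = c.toNat + 32 := by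
  rw [PySem.Chars.lowerChar, if_pos h, toNat_ofNat_valid]
  rw [isupper_iff] at h; omega

lemma toNat_upperChar_of_islower (c : Char) (h : PySem.Chars.islower c = true) :
    (PySem.Chars.upperChar c).toNat = c.toNat - 32 := by
  rw [PySem.Chars.upperChar, if_pos h, toNat_ofNat_valid]
  rw [islower_iff] at h; omega

lemma islower_lowerChar_of_isupper (c : Char) (h : PySem.Chars.isupper c = true) :
    PySem.Chars.islower (PySem.Chars.lowerChar c) = true := by
  rw [islower_iff, toNat_lowerChar_of_isupper c h]; rw [isupper_iff] at h; omega

lemma isupper_upperChar_of_islower (c : Char) (h : PySem.Chars.islower c = true) :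
    PySem.Chars.isupper (PySem.Chars.upperChar c) = true := by
  rw [isupper_iff, toNat_upperChar_of_islower c h]; rw [islower_iff] at h; omega

lemma upperChar_lowerChar_of_isupper (c : Char) (h : PySem.Chars.isupper c = true) :
    PySem.Chars.upperChar (PySem.Chars.lowerChar c) = c := by
  rw [char_eq_iff, toNat_upperChar_of_islower _ (islower_lowerChar_of_isupper c h),
      toNat_lowerChar_of_isupper c h]; omega

lemma lowerChar_upperChar_of_islower (c : Char) (h : PySem.Chars.islower c = true) :
    PySem.Chars.lowerChar (PySem.Chars.upperChar c) = c := by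
  rw [char_eq_iff, toNat_lowerChar_of_isupper _ (isupper_upperChar_of_islower c h),
      toNat_upperChar_of_islower c h]
  rw [islower_iff] at h; omega

lemma not_isupper_of_islower (c : Char) (h : PySem.Chars.islower c = true) :
    PySem.Chars.isupper c = false := by
  rw [islower_iff] at h; rw [← Bool.not_eq_true, isupper_iff]; omega

lemma singleton_infix {α : Type} (a : α) (l : List α) : [a] <:+: l ↔ a ∈ l := by
  constructor
  · intro h; exact h.subset (List.mem_singleton_self a)
  · intro h
    obtain ⟨l₁, l₂, rfl⟩ := List.append_of_mem h
    exact ⟨l₁, l₂, by simp⟩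

lemma ofList_append_singleton {α : Type} [BEq α] (ys : List α) (c : α) :
    PySem.Set.ofList (ys ++ [c]) = PySem.Set.add (PySem.Set.ofList ys) c := by
  rw [PySem.Set.ofList_eq_foldl, PySem.Set.ofList_eq_foldl, List.foldl_append]; rfl

-- cek_baik t is exactly: lowercase-letter set of t = lowered uppercase-letter set of t
lemma cek_iff (t : List Char) :
    cekBaik t = PySem.Set.equal (PySem.Set.ofList (t.filter PySem.Chars.islower))
      (PySem.Set.ofList ((t.filter PySem.Chars.isupper).map PySem.Chars.lowerChar)) := by
  have mem1 : ∀ x : Char, PySem.Chars.isIn [x] t = true ↔ x ∈ t := fun x =>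
    (PySem.Chars.isIn_iff_infix _ _).trans (singleton_infix x t)
  have lhs : cekBaik t = true ↔
      (∀ c ∈ PySem.Chars.lower t, PySem.Chars.isalpha c = true →
        PySem.Chars.lowerChar c ∈ t ∧ PySem.Chars.upperChar c ∈ t) := by
    rw [cekBaik, PySem.List.foldl_if_false_eq, Bool.true_and, Bool.not_eq_eq_eq_not, Bool.not_true,
        List.any_eq_false]
    constructor
    · intro h c hc hal
      have hcf := h c ((PySem.Set.mem_ofList _ _).mpr hc)
      simp only [hal, Bool.true_and, Bool.or_eq_true, Bool.not_eq_true'] at hcf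
      push Not at hcf
      exact ⟨(mem1 _).mp (Bool.ne_false_iff.mp hcf.1), (mem1 _).mp (Bool.ne_false_iff.mp hcf.2)⟩
    · intro h c hc
      rw [PySem.Set.mem_ofList] at hc
      by_cases hal : PySem.Chars.isalpha c = true
      · obtain ⟨h1, h2⟩ := h c hc hal
        simp [hal, (mem1 _).mpr h1, (mem1 _).mpr h2]
      · simp [Bool.eq_false_iff.mpr hal]
  have rhs : PySem.Set.equal (PySem.Set.ofList (t.filter PySem.Chars.islower))
      (PySem.Set.ofList ((t.filter PySem.Chars.isupper).map PySem.Chars.lowerChar)) = true ↔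
      (∀ x : Char, (x ∈ t ∧ PySem.Chars.islower x = true) ↔
        (∃ d, (d ∈ t ∧ PySem.Chars.isupper d = true) ∧ PySem.Chars.lowerChar d = x)) := by
    rw [PySem.Set.equal_iff]
    constructor
    · intro h x; have := h x; simpa [PySem.Set.mem_ofList, List.mem_filter] using this
    · intro h x; have := h x; simpa [PySem.Set.mem_ofList, List.mem_filter] using this
  rw [Bool.eq_iff_iff, lhs, rhs]
  constructor
  · intro hP x
    constructor
    · rintro ⟨hxt, hxl⟩
      have hx' : PySem.Chars.lowerChar x ∈ PySem.Chars.lower t := List.mem_map_of_mem hxt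
      rw [lowerChar_of_islower x hxl] at hx'
      have hh := hP x hx' (by simp [PySem.Chars.isalpha, hxl])
      exact ⟨PySem.Chars.upperChar x, ⟨hh.2, isupper_upperChar_of_islower x hxl⟩,
        lowerChar_upperChar_of_islower x hxl⟩
    · rintro ⟨d, ⟨hdt, hdu⟩, rfl⟩
      have hx' : PySem.Chars.lowerChar d ∈ PySem.Chars.lower t := List.mem_map_of_mem hdt
      have hl := islower_lowerChar_of_isupper d hdu
      have hh := hP _ hx' (by simp [PySem.Chars.isalpha, hl])
      rw [lowerChar_of_islower _ hl] at hh
      exact ⟨hh.1, hl⟩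
  · intro hQ c hc hal
    obtain ⟨d, hdt, rfl⟩ := List.mem_map.mp hc
    by_cases hdl : PySem.Chars.islower d = true
    · obtain ⟨e, ⟨het, heu⟩, he⟩ := (hQ d).mp ⟨hdt, hdl⟩
      rw [lowerChar_of_islower d hdl]
      refine ⟨by rw [lowerChar_of_islower d hdl]; exact hdt, ?_⟩
      rw [← he, upperChar_lowerChar_of_isupper e heu]; exact het
    · by_cases hdu : PySem.Chars.isupper d = true
      · have hl := islower_lowerChar_of_isupper d hdu
        have hh := (hQ _).mpr ⟨d, ⟨hdt, hdu⟩, rfl⟩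
        refine ⟨by rw [lowerChar_of_islower _ hl]; exact hh.1, ?_⟩
        rw [upperChar_lowerChar_of_isupper d hdu]; exact hdt
      · exfalso
        rw [lowerChar_of_not_upper d (Bool.eq_false_iff.mpr hdu)] at hal
        rw [PySem.Chars.isalpha] at hal
        simp [Bool.eq_false_iff.mpr hdu, Bool.eq_false_iff.mpr hdl] at hal


-- inner-loop invariant: B's fold state tracks the letter sets of cs[a:k], so B's inner fold
-- computes exactly A's inner fold
lemma inner_fold (cs : List Char) (a : Nat) :
    ∀ (m k : Nat), a ≤ k → k + m = cs.length → ∀ best : List Char,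
    ((PySem.List.pyRange (k : Int) (cs.length : Int) 1).foldl (stepB cs (a : Int))
        (PySem.Set.ofList (((cs.drop a).take (k - a)).filter PySem.Chars.islower),
         PySem.Set.ofList ((((cs.drop a).take (k - a)).filter PySem.Chars.isupper).map
            PySem.Chars.lowerChar),
         best)).2.2
      = (PySem.List.pyRange (k : Int) (cs.length : Int) 1).foldl (stepA cs (a : Int)) best := by
  intro m
  induction m with
  | zero =>
    intro k hk hlen best
    have hkl : k = cs.length := by omega
    subst hkl
    have hnil : PySem.List.pyRange (cs.length : Int) (cs.length : Int) 1 = [] := by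
      simp [PySem.List.pyRange]
    rw [hnil]
    rfl
  | succ m ih =>
    intro k hk hlen best
    have hklt : k < cs.length := by omega
    have hcons : PySem.List.pyRange (k : Int) (cs.length : Int) 1
        = (k : Int) :: PySem.List.pyRange ((k : Int) + 1) (cs.length : Int) 1 :=
      PySem.List.pyRange_one_cons (by exact_mod_cast hklt)
    rw [hcons, List.foldl_cons, List.foldl_cons]
    have hdlen : (cs.drop a).length = cs.length - a := List.length_drop
    have ht' : (cs.drop a).take (k + 1 - a) = (cs.drop a).take (k - a) ++ [cs[k]] := by
      have he : k + 1 - a = (k - a) + 1 := by omega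
      rw [he, List.take_add_one]
      congr 1
      rw [List.getElem?_drop]
      have he2 : a + (k - a) = k := by omega
      rw [he2, List.getElem?_eq_getElem hklt]
      rfl
    have hslice : PySem.List.slice cs (some (a : Int)) (some ((k : Int) + 1))
        = (cs.drop a).take (k + 1 - a) := by
      have he : ((k : Int) + 1) = ((k + 1 : Nat) : Int) := by push_cast; ring
      rw [he, PySem.List.slice_natCast]
    have hlen' : ((cs.drop a).take (k + 1 - a)).length = k + 1 - a := by
      rw [List.length_take, hdlen]; omega
    have hget : PySem.List.pyGetD cs (k : Int) ' ' = cs[k] := by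
      rw [PySem.List.pyGetD_natCast, List.getD_eq_getElem?_getD, List.getElem?_eq_getElem hklt]
      rfl
    have hcond : decide ((best.length : Int) < (k : Int) - (a : Int) + 1)
        = decide (best.length < ((cs.drop a).take (k + 1 - a)).length) := by
      rw [hlen', decide_eq_decide]
      omega
    have hstep : stepB cs (a : Int)
        (PySem.Set.ofList (((cs.drop a).take (k - a)).filter PySem.Chars.islower),
         PySem.Set.ofList ((((cs.drop a).take (k - a)).filter PySem.Chars.isupper).map
            PySem.Chars.lowerChar),
         best) (k : Int)
        = (PySem.Set.ofList (((cs.drop a).take (k + 1 - a)).filter PySem.Chars.islower),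
           PySem.Set.ofList ((((cs.drop a).take (k + 1 - a)).filter PySem.Chars.isupper).map
              PySem.Chars.lowerChar),
           stepA cs (a : Int) best (k : Int)) := by
      rw [stepB, stepA]
      simp only [hget, hslice, cek_iff, hcond, ht', List.filter_append, List.map_append]
      by_cases hlc : PySem.Chars.islower cs[k] = true
      · have hup := not_isupper_of_islower _ hlc
        have hal : PySem.Chars.isalpha cs[k] = true := by
          rw [PySem.Chars.isalpha]; simp [hlc]
        simp [hal, hlc, hup, ofList_append_singleton]
      · by_cases hu : PySem.Chars.isupper cs[k] = true
        · have hal : PySem.Chars.isalpha cs[k] = true := by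
            rw [PySem.Chars.isalpha]; simp [hu]
          simp [hal, hlc, hu, ofList_append_singleton]
        · have hal : PySem.Chars.isalpha cs[k] = false := by
            rw [PySem.Chars.isalpha]
            simp [Bool.eq_false_iff.mpr hlc, Bool.eq_false_iff.mpr hu]
          simp [hal, Bool.eq_false_iff.mpr hlc, Bool.eq_false_iff.mpr hu]
    rw [hstep]
    have hcast : ((k : Int) + 1) = ((k + 1 : Nat) : Int) := by push_cast; ring
    rw [hcast]
    exact ih (k + 1) (by omega) (by omega) (stepA cs (a : Int) best (k : Int))

-- ===== VERDICT (by name: the statement is the Claim_ definition above) =====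
theorem solusi_spec : Claim_equal_solusi := by
  intro s _
  unfold Spec_solusi solusi solusi_alt
  simp only
  congr 1
  apply PySem.List.foldl_congr_mem
  intro best i hi
  rw [PySem.List.mem_pyRange_one] at hi
  obtain ⟨h0, h1⟩ := hi
  obtain ⟨a, rfl⟩ : ∃ a : Nat, i = (a : Int) := ⟨i.toNat, (Int.toNat_of_nonneg h0).symm⟩
  have := inner_fold s.toList a (s.toList.length - a) a le_rfl (by omega) best
  simp only [Nat.sub_self, List.take_zero, List.filter_nil, List.map_nil] at this
  exact this.symm
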